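-- pv_equiv track=rewrite | github.com/Julesc013/dominium | src/reality/ledger/ledger_engine.py | _mode_row
-- ===== SOURCE A (Python) =====
-- def _mode_row(contract_set_row: dict, quantity_id: str) -> dict:
--     rows = contract_set_row.get("quantities")
--     if not isinstance(rows, list):
--         return {}
--     for row in sorted((item for item in rows if isinstance(item, dict)), key=lambda item: str(item.get("quantity_id", ""))):
--         if str(row.get("quantity_id", "")).strip() == str(quantity_id).strip():
--             return dict(row)
--     return {}
-- ===== SOURCE B (Python) =====
-- def _mode_row(contract_set_row: dict, quantity_id: str) -> dict:
--     rows = contract_set_row.get("quantities")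
--     if not isinstance(rows, list):
--         return {}
--     target = str(quantity_id).strip()
--     best = None
--     best_key = None
--     for row in rows:
--         if not isinstance(row, dict):
--             continue
--         key = str(row.get("quantity_id", ""))
--         if key.strip() == target:
--             if best is None or key < best_key:
--                 best = row
--                 best_key = key
--     return dict(best) if best is not None else {}
-- ===== Notes on version B (the rewrite author's own statement) =====
-- stated objective: alternative
-- what changed: Replaces A's sort-the-whole-list-then-scan-for-first-match with a single pass that keeps the running minimum-key matching row (strict < so the first occurrence wins ties), avoiding the sort entirely.
import Mathlib
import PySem

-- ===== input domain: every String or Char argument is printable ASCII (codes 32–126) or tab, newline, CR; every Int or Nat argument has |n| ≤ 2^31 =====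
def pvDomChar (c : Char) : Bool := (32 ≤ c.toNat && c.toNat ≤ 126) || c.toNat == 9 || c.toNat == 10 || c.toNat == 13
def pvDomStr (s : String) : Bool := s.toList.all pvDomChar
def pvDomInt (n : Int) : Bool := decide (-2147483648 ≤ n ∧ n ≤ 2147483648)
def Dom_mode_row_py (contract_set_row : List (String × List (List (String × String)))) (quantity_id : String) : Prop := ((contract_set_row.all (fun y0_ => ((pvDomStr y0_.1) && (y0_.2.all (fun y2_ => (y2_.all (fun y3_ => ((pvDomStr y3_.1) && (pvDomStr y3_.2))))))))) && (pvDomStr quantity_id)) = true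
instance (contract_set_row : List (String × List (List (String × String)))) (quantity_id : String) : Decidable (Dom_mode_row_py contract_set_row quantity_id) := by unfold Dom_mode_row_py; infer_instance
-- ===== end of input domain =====

-- B replaces A's sort-then-scan-for-first-match by a single pass keeping the
-- minimum-key matching row (strict <, so the first occurrence wins ties); same
-- return value, no sort (objective: alternative algorithm).

-- ===== PORT A =====
-- row.get("quantity_id", "") on the row dict (association list, first match)
def pvRowKey (row : List (String × String)) : String :=
  ((row.find? (fun p => p.1 == "quantity_id")).map Prod.snd).getD ""

-- the for-loop over the sorted rows: return the first row whose stripped key equals t, else {}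
def pvScanSorted (t : String) : List (List (String × String)) → List (String × String)
  | [] => []
  | r :: rest => if PySem.Str.strip (pvRowKey r) == t then r else pvScanSorted t rest

-- In the Lean type every value of "quantities" is a list and every row a dict,
-- so the isinstance checks of A are identically true and dict(row) = row.
def mode_row_py (contract_set_row : List (String × List (List (String × String)))) (quantity_id : String) : List (String × String) :=
  match contract_set_row.find? (fun p => p.1 == "quantities") with
  | none => []
  | some q => pvScanSorted (PySem.Str.strip quantity_id) (PySem.List.sorted q.2 pvRowKey)

-- ===== PORT B =====
-- one step of B's loop: state = Option (best row, best_key)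
def pvBestStep (t : String) (s : Option ((List (String × String)) × String)) (row : List (String × String)) : Option ((List (String × String)) × String) :=
  let key := pvRowKey row
  if PySem.Str.strip key == t then
    match s with
    | none => some (row, key)
    | some bp => if key < bp.2 then some (row, key) else some bp
  else s

def mode_row_py_alt (contract_set_row : List (String × List (List (String × String)))) (quantity_id : String) : List (String × String) :=
  match contract_set_row.find? (fun p => p.1 == "quantities") with
  | none => []
  | some q =>
    match q.2.foldl (pvBestStep (PySem.Str.strip quantity_id)) none with
    | some bp => bp.1
    | none => []

-- ===== PRECONDITION & SPEC =====
def Spec_mode_row_py (contract_set_row : List (String × List (List (String × String)))) (quantity_id : String) (out : List (String × String)) : Prop := out = mode_row_py_alt contract_set_row quantity_id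
instance (contract_set_row : List (String × List (List (String × String)))) (quantity_id : String) (out : List (String × String)) : Decidable (Spec_mode_row_py contract_set_row quantity_id out) := by unfold Spec_mode_row_py; infer_instance

-- ===== CLAIM (what is proved, stated in full; the proofs are below) =====
def Claim_equal_mode_row_py : Prop := ∀ (contract_set_row : List (String × List (List (String × String)))) (quantity_id : String), Dom_mode_row_py contract_set_row quantity_id → Spec_mode_row_py contract_set_row quantity_id (mode_row_py contract_set_row quantity_id)

-- ===== LEMMAS AND PROOFS =====

-- the match predicate of both loops
def pvP (t : String) (r : List (String × String)) : Bool := PySem.Str.strip (pvRowKey r) == t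

-- B's step on the bare row (without the cached key)
def pvAStep (t : String) (s : Option (List (String × String))) (x : List (String × String)) : Option (List (String × String)) :=
  if pvP t x then
    match s with
    | none => some x
    | some y => if pvRowKey x < pvRowKey y then some x else some y
  else s

theorem pvScanSorted_eq_find (t : String) (l : List (List (String × String))) :
    pvScanSorted t l = (List.find? (pvP t) l).getD [] := by
  induction l with
  | nil => rfl
  | cons r rest ih =>
    simp only [pvScanSorted, List.find?, pvP]
    by_cases h : (PySem.Str.strip (pvRowKey r) == t) = true
    · simp [h]
    · simp [h, ih]

theorem pvPairwise_insertBy (x : List (String × String)) (ys : List (List (String × String)))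
    (h : ys.Pairwise (fun a b => pvRowKey a ≤ pvRowKey b)) :
    (PySem.List.insertBy (fun a b => decide (pvRowKey a < pvRowKey b)) x ys).Pairwise (fun a b => pvRowKey a ≤ pvRowKey b) := by
  induction ys with
  | nil => simp [PySem.List.insertBy]
  | cons y ys ih =>
    rw [List.pairwise_cons] at h
    simp only [PySem.List.insertBy]
    by_cases hb : pvRowKey x < pvRowKey y
    · simp only [hb, decide_true, if_true]
      refine List.pairwise_cons.2 ⟨?_, List.pairwise_cons.2 ⟨h.1, h.2⟩⟩
      intro z hz
      rcases List.mem_cons.1 hz with rfl | hz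
      · exact le_of_lt hb
      · exact le_of_lt (lt_of_lt_of_le hb (h.1 z hz))
    · simp only [hb, decide_false]
      refine List.pairwise_cons.2 ⟨?_, ih h.2⟩
      intro z hz
      rcases (PySem.List.mem_insertBy _ _ _ _).1 hz with rfl | hz
      · exact le_of_not_gt hb
      · exact h.1 z hz

theorem pvFind_insertBy (t : String) (x : List (String × String)) (ys : List (List (String × String)))
    (h : ys.Pairwise (fun a b => pvRowKey a ≤ pvRowKey b)) :
    List.find? (pvP t) (PySem.List.insertBy (fun a b => decide (pvRowKey a < pvRowKey b)) x ys)
      = pvAStep t (List.find? (pvP t) ys) x := by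
  induction ys with
  | nil =>
    simp only [PySem.List.insertBy, List.find?, pvAStep]
    by_cases hp : pvP t x = true <;> simp [hp]
  | cons y ys ih =>
    rw [List.pairwise_cons] at h
    simp only [PySem.List.insertBy]
    by_cases hb : pvRowKey x < pvRowKey y
    · simp only [hb, decide_true, if_true]
      by_cases hp : pvP t x = true
      · -- x matches: any match in y::ys has key ≥ key y > key x
        have hkey : ∀ z, List.find? (pvP t) (y :: ys) = some z → pvRowKey x < pvRowKey z := by
          intro z hz
          have hmem := List.mem_of_find?_eq_some hz
          rcases List.mem_cons.1 hmem with rfl | hzm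
          · exact hb
          · exact lt_of_lt_of_le hb (h.1 z hzm)
        cases hfy : List.find? (pvP t) (y :: ys) with
        | none => simp [hp, pvAStep]
        | some z =>
          have := hkey z hfy
          simp [hp, pvAStep, this]
      · simp only [Bool.not_eq_true] at hp
        simp [List.find?_cons, hp, pvAStep]
    · simp only [hb, decide_false]
      by_cases hy : pvP t y = true
      · have hxy : ¬ pvRowKey x < pvRowKey y := hb
        simp [hy, pvAStep, hxy]
      · simp only [Bool.not_eq_true] at hy
        rw [if_neg (by simp), List.find?_cons_of_neg (by simp [hy]),
            List.find?_cons_of_neg (by simp [hy])]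
        exact ih h.2

theorem pvFind_foldl (t : String) (xs acc : List (List (String × String)))
    (h : acc.Pairwise (fun a b => pvRowKey a ≤ pvRowKey b)) :
    List.find? (pvP t) (xs.foldl (fun a x => PySem.List.insertBy (fun a b => decide (pvRowKey a < pvRowKey b)) x a) acc)
      = xs.foldl (pvAStep t) (List.find? (pvP t) acc) := by
  induction xs generalizing acc with
  | nil => rfl
  | cons x xs ih =>
    simp only [List.foldl_cons]
    rw [ih _ (pvPairwise_insertBy x acc h), pvFind_insertBy t x acc h]

theorem pvBestStep_map (t : String) (s : Option (List (String × String))) (x : List (String × String)) :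
    pvBestStep t (s.map (fun r => (r, pvRowKey r))) x
      = (pvAStep t s x).map (fun r => (r, pvRowKey r)) := by
  cases s with
  | none =>
    simp only [pvBestStep, pvAStep, pvP, Option.map_none]
    by_cases hp : (PySem.Str.strip (pvRowKey x) == t) = true <;> simp [hp]
  | some y =>
    simp only [pvBestStep, pvAStep, pvP, Option.map_some]
    by_cases hp : (PySem.Str.strip (pvRowKey x) == t) = true
    · by_cases hlt : pvRowKey x < pvRowKey y <;> simp [hp, hlt]
    · simp [hp]

theorem pvBestFold_map (t : String) (xs : List (List (String × String))) (s : Option (List (String × String))) :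
    xs.foldl (pvBestStep t) (s.map (fun r => (r, pvRowKey r)))
      = (xs.foldl (pvAStep t) s).map (fun r => (r, pvRowKey r)) := by
  induction xs generalizing s with
  | nil => rfl
  | cons x xs ih => simp only [List.foldl_cons, pvBestStep_map, ih]

-- ===== VERDICT (by name: the statement is the Claim_ definition above) =====
theorem mode_row_py_spec : Claim_equal_mode_row_py := by
  intro csr qid _
  unfold Spec_mode_row_py mode_row_py mode_row_py_alt
  cases hfq : csr.find? (fun p => p.1 == "quantities") with
  | none => rfl
  | some q =>
    simp only
    rw [pvScanSorted_eq_find, PySem.List.sorted_eq_foldl_insertBy,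
        pvFind_foldl _ _ [] List.Pairwise.nil]
    have hmap := pvBestFold_map (PySem.Str.strip qid) q.2 none
    simp only [Option.map_none] at hmap
    rw [hmap]
    simp only [List.find?_nil]
    cases q.2.foldl (pvAStep (PySem.Str.strip qid)) none <;> rfl
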